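-- pv_equiv track=rewrite | github.com/mhsuab/ComputerSecurity2020 | reverse/HW0x08/wishMachine/solve.py | sub_401138
-- ===== SOURCE A (Python) =====
-- def sub_401138(_input):
--     v1 = 0xFAC0B00C
--     for i in range(_input):
--         if (i & 1):
--             v1 -= 0x78
--         else:
--             v1 -= 0x7788
--     return v1
-- ===== SOURCE B (Python) =====
-- def sub_401138(_input):
--     n = max(_input, 0)
--     return 0xFAC0B00C - 0x7788 * ((n + 1) // 2) - 0x78 * (n // 2)
-- ===== Notes on version B (the rewrite author's own statement) =====
-- stated objective: faster
-- what changed: Replaces the O(n) loop subtracting a parity-dependent constant per iteration with a closed form counting even and odd indices and multiplying.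
import Mathlib
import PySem

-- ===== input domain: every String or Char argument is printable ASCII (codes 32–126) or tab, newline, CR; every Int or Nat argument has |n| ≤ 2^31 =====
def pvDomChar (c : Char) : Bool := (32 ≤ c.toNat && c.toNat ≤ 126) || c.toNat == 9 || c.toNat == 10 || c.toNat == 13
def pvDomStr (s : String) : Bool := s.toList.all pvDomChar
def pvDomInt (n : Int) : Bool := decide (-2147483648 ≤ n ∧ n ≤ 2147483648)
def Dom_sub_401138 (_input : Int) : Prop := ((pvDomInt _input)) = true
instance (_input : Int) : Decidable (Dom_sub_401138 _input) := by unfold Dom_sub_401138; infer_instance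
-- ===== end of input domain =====

-- B replaces A's O(n) loop with a closed form counting even and odd loop indices; faster (asymptotic).

-- ===== PORT A =====
def sub_401138 (_input : Int) : Int :=
  (PySem.List.pyRange 0 _input 1).foldl
    (fun v1 i => if Int.land i 1 ≠ 0 then v1 - 0x78 else v1 - 0x7788)
    0xFAC0B00C

-- ===== PORT B =====
def sub_401138_alt (_input : Int) : Int :=
  let n := max _input 0
  0xFAC0B00C - 0x7788 * ((n + 1) / 2) - 0x78 * (n / 2)

-- ===== PRECONDITION & SPEC =====
def Spec_sub_401138 (_input : Int) (out : Int) : Prop := out = sub_401138_alt _input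
instance (_input : Int) (out : Int) : Decidable (Spec_sub_401138 _input out) := by unfold Spec_sub_401138; infer_instance

-- ===== CLAIM (what is proved, stated in full; the proofs are below) =====
def Claim_equal_sub_401138 : Prop := ∀ (_input : Int), Dom_sub_401138 _input → Spec_sub_401138 _input (sub_401138 _input)

-- ===== LEMMAS AND PROOFS =====

theorem pv_land_one (m : Nat) : Int.land (m : Int) 1 = ((m % 2 : Nat) : Int) := by
  show ((m &&& 1 : Nat) : Int) = ((m % 2 : Nat) : Int)
  rw [Nat.and_one_is_mod]

theorem pv_loop_closed (m : Nat) :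
    (PySem.List.pyRange 0 (m : Int) 1).foldl
      (fun v1 i => if Int.land i 1 ≠ 0 then v1 - 0x78 else v1 - 0x7788) 0xFAC0B00C
    = 0xFAC0B00C - 0x7788 * (((m + 1) / 2 : Nat) : Int) - 0x78 * (((m / 2 : Nat) : Int)) := by
  induction m with
  | zero => simp
  | succ k ih =>
    rw [show ((k + 1 : Nat) : Int) = (k : Int) + 1 by push_cast; ring,
        PySem.List.pyRange_one_succ_right (by positivity), List.foldl_append, ih]
    simp only [List.foldl_cons, List.foldl_nil, pv_land_one k]
    rcases Nat.even_or_odd k with hk | hk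
    · have h2 : k % 2 = 0 := Nat.even_iff.mp hk
      have : ((k % 2 : Nat) : Int) ≠ 0 ↔ False := by simp [h2]
      rw [if_neg (by simp [h2])]
      have e1 : (k + 1 + 1) / 2 = (k + 1) / 2 + 1 := by omega
      have e2 : (k + 1) / 2 = k / 2 := by omega
      rw [e1, e2]; push_cast; ring
    · have h2 : k % 2 = 1 := Nat.odd_iff.mp hk
      rw [if_pos (by simp [h2])]
      have e1 : (k + 1 + 1) / 2 = (k + 1) / 2 := by omega
      have e2 : (k + 1) / 2 = k / 2 + 1 := by omega
      rw [e1, e2]; push_cast; ring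

-- ===== VERDICT (by name: the statement is the Claim_ definition above) =====
theorem sub_401138_spec : Claim_equal_sub_401138 := by
  intro n _
  unfold Spec_sub_401138 sub_401138 sub_401138_alt
  rcases le_or_gt n 0 with hn | hn
  · rw [PySem.List.pyRange_one_eq_nil hn, max_eq_right hn]
    simp
  · have hm : n = ((n.toNat : Nat) : Int) := by omega
    rw [max_eq_left hn.le, hm, pv_loop_closed]
    have e1 : (((n.toNat + 1) / 2 : Nat) : Int) = ((n.toNat : Int) + 1) / 2 := by omega
    have e2 : (((n.toNat / 2 : Nat)) : Int) = (n.toNat : Int) / 2 := by omega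
    rw [e1, e2]
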